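-- pv_equiv track=rewrite | github.com/pseminatore/nbaGA | nba_genetic_algorithm.py | i_build_starting_five
-- ===== SOURCE A (Python) =====
-- def i_build_starting_five(team, player_idcs):
--     positions = ['C', 'PF', 'SF', 'SG', 'PG']
--     zpd_team = list(zip(team, player_idcs))
--     for position in positions:
--         for player in zpd_team:
--             if player[0][2] == position:
--                 zpd_team.insert(0, zpd_team.pop(zpd_team.index(player)))
--                 break
--     return zpd_team
-- ===== SOURCE B (Python) =====
-- def i_build_starting_five(team, player_idcs):
--     zpd = list(zip(team, player_idcs))
--     selected = {}
--     for p in zpd: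
--         selected.setdefault(p[0][2], p)
--     front = [selected[pos] for pos in ('PG', 'SG', 'SF', 'PF', 'C') if pos in selected]
--     tail = list(zpd)
--     for pos in ('C', 'PF', 'SF', 'SG', 'PG'):
--         if pos in selected:
--             tail.remove(selected[pos])
--     return front + tail
-- ===== Notes on version B (the rewrite author's own statement) =====
-- stated objective: alternative
-- what changed: B replaces A's five destructive scan-and-move-to-front passes over a mutating list by one pass that records the first player per position in a dict, then assembles front (PG,SG,SF,PF,C) and removes exactly the chosen players from a copy for the tail.
import Mathlib
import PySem

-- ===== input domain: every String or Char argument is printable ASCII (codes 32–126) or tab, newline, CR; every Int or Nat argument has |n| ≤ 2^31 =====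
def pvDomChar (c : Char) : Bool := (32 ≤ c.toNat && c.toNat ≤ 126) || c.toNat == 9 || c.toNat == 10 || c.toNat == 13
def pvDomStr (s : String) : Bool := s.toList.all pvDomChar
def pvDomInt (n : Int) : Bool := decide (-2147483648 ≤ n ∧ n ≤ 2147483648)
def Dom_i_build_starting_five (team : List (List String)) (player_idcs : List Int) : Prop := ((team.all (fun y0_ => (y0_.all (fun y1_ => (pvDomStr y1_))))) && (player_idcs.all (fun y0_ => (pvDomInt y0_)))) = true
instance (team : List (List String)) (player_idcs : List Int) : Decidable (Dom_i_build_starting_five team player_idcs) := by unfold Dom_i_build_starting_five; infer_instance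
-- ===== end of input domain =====

-- B builds the starting five with ONE pass recording the first player per position in a dict,
-- instead of A's five scan-move-to-front passes over a mutating list; same return value, not faster.

-- player[0][2], the position string of a zipped player (none = the IndexError Pre_ excludes)
def pvKey (p : List String × Int) : Option String := PySem.List.pyGet? p.1 2

-- ===== PORT A =====
-- A's inner 'for player in zpd_team: if player[0][2] == position: move it to front; break':
-- pvScan returns the first player whose position matches together with the list without it
-- (A's 'zpd_team.index(player)' is the index of that first match, since equal tuples have equal positions).
def pvScan (l : List (List String × Int)) (pos : String) :
    Option ((List String × Int) × List (List String × Int)) :=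
  match l with
  | [] => none
  | x :: xs =>
    if pvKey x = some pos then some (x, xs)
    else match pvScan xs pos with
         | none => none
         | some (y, ys) => some (y, x :: ys)

def i_build_starting_five (team : List (List String)) (player_idcs : List Int) : List (List String × Int) :=
  (["C", "PF", "SF", "SG", "PG"]).foldl
    (fun zpd pos =>
      match pvScan zpd pos with
      | none => zpd
      | some (x, r) => x :: r)     -- zpd_team.insert(0, zpd_team.pop(zpd_team.index(player)))
    (team.zip player_idcs)

-- ===== PORT B =====
def i_build_starting_five_alt (team : List (List String)) (player_idcs : List Int) : List (List String × Int) :=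
  let zpd := team.zip player_idcs
  -- for p in zpd: selected.setdefault(p[0][2], p)
  let selected : PySem.Dict String (List String × Int) :=
    zpd.foldl (fun d p =>
      match pvKey p with
      | some pos => d.setdefault pos p
      | none => d) PySem.Dict.empty
  -- front = [selected[pos] for pos in ('PG','SG','SF','PF','C') if pos in selected]
  let front := (["PG", "SG", "SF", "PF", "C"]).filterMap (fun pos => selected.get? pos)
  -- tail = list(zpd); for pos in (…): if pos in selected: tail.remove(selected[pos])
  -- (the selected player is always present, so list.remove never raises; getD is only a totality guard)
  let tail := (["C", "PF", "SF", "SG", "PG"]).foldl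
    (fun t pos =>
      match selected.get? pos with
      | none => t
      | some x => (PySem.List.remove? t x).getD t) zpd
  front ++ tail

-- ===== PRECONDITION & SPEC =====
-- Pre_ excludes teams where some zipped player entry has fewer than 3 fields: Python A raises
-- IndexError on almost all of them (it returns only when all five positions match before the
-- short entry), and Python B always raises IndexError there.
def Pre_i_build_starting_five (team : List (List String)) (player_idcs : List Int) : Prop :=
  ∀ p ∈ team.zip player_idcs, 3 ≤ p.1.length
instance (team : List (List String)) (player_idcs : List Int) : Decidable (Pre_i_build_starting_five team player_idcs) := by unfold Pre_i_build_starting_five; infer_instance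

def pvWitness_i_build_starting_five : List (List String) × List Int :=
  ([["Al", "12", "C"], ["Bo", "7", "PG"], ["Cy", "3", "PG"]], [0, 1, 2])

def Spec_i_build_starting_five (team : List (List String)) (player_idcs : List Int) (out : List (List String × Int)) : Prop := out = i_build_starting_five_alt team player_idcs
instance (team : List (List String)) (player_idcs : List Int) (out : List (List String × Int)) : Decidable (Spec_i_build_starting_five team player_idcs out) := by unfold Spec_i_build_starting_five; infer_instance

-- ===== CLAIM (what is proved, stated in full; the proofs are below) =====
def Claim_equal_i_build_starting_five : Prop := ∀ (team : List (List String)) (player_idcs : List Int), Dom_i_build_starting_five team player_idcs → Pre_i_build_starting_five team player_idcs → Spec_i_build_starting_five team player_idcs (i_build_starting_five team player_idcs)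

-- ===== LEMMAS AND PROOFS =====

-- the value moved to front / selected for a position: first player whose key matches
def pvScanFst (l : List (List String × Int)) (q : String) : Option (List String × Int) :=
  (pvScan l q).map Prod.fst

-- removing the first match of a position (the identity if there is none)
def pvRemove (l : List (List String × Int)) (q : String) : List (List String × Int) :=
  match pvScan l q with
  | none => l
  | some (_, r) => r

lemma pvScan_key {l : List (List String × Int)} {q : String} {x : List String × Int}
    {r : List (List String × Int)} (h : pvScan l q = some (x, r)) : pvKey x = some q := by
  induction l generalizing x r with
  | nil => simp [pvScan] at h
  | cons a t ih =>
    by_cases ha : pvKey a = some q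
    · simp [pvScan, ha] at h; rw [← h.1]; exact ha
    · simp only [pvScan, if_neg ha] at h
      cases hs : pvScan t q with
      | none => rw [hs] at h; simp at h
      | some p =>
        obtain ⟨y, ys⟩ := p
        rw [hs] at h; simp at h
        rw [← h.1]; exact ih hs

lemma pvScanFst_remove {l : List (List String × Int)} {p q : String} {x : List String × Int}
    {r : List (List String × Int)} (h : pvScan l p = some (x, r)) (hq : pvKey x ≠ some q) :
    pvScanFst r q = pvScanFst l q := by
  induction l generalizing x r with
  | nil => simp [pvScan] at h
  | cons a t ih =>
    by_cases hap : pvKey a = some p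
    · simp only [pvScan, if_pos hap, Option.some.injEq, Prod.mk.injEq] at h
      obtain ⟨hx, hr⟩ := h
      subst hx; subst hr
      simp only [pvScanFst, pvScan, if_neg hq]
      cases pvScan t q with
      | none => simp
      | some w => obtain ⟨w1, w2⟩ := w; simp
    · simp only [pvScan, if_neg hap] at h
      cases hs : pvScan t p with
      | none => rw [hs] at h; simp at h
      | some pr =>
        obtain ⟨y, ys⟩ := pr
        rw [hs] at h; simp at h
        obtain ⟨hx, hr⟩ := h
        subst hx; subst hr
        by_cases haq : pvKey a = some q
        · simp [pvScanFst, pvScan, haq]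
        · have hft := ih hs hq
          simp only [pvScanFst, pvScan, if_neg haq]
          simp only [pvScanFst] at hft
          cases h1 : pvScan ys q with
          | none =>
            rw [h1] at hft
            cases h3 : pvScan t q with
            | none => simp
            | some w => rw [h3] at hft; obtain ⟨w1, w2⟩ := w; simp at hft
          | some w =>
            obtain ⟨w1, w2⟩ := w
            rw [h1] at hft
            cases h3 : pvScan t q with
            | none => rw [h3] at hft; simp at hft
            | some v =>
              obtain ⟨v1, v2⟩ := v
              rw [h3] at hft; simp at hft
              simp [hft]

-- a player whose key matches no remaining position stays at the head through the removals
lemma pvRemove_cons {m : List (List String × Int)} {q : String} {x : List String × Int}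
    (hx : pvKey x ≠ some q) : pvRemove (x :: m) q = x :: pvRemove m q := by
  simp only [pvRemove, pvScan, if_neg hx]
  cases h : pvScan m q with
  | none => simp
  | some p => obtain ⟨y, ys⟩ := p; simp

lemma foldl_pvRemove_cons {ps : List String} {x : List String × Int}
    (hx : ∀ q ∈ ps, pvKey x ≠ some q) :
    ∀ m, ps.foldl pvRemove (x :: m) = x :: ps.foldl pvRemove m := by
  induction ps with
  | nil => intro m; simp
  | cons p ps ih =>
    intro m
    have h1 : pvRemove (x :: m) p = x :: pvRemove m p :=
      pvRemove_cons (hx p (by simp))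
    simp only [List.foldl_cons, h1]
    exact ih (fun q hq => hx q (by simp [hq])) _

-- A's five passes produce: selected players (in reverse position order) ++ the rest with them removed
lemma A_shape (ps : List String) :
    ∀ l, ps.Pairwise (· ≠ ·) →
      ps.foldl (fun zpd pos =>
          match pvScan zpd pos with
          | none => zpd
          | some (x, r) => x :: r) l
      = ps.reverse.filterMap (fun q => pvScanFst l q) ++ ps.foldl pvRemove l := by
  induction ps with
  | nil => intro l _; simp
  | cons p ps ih =>
    intro l hpw
    have hpw' := (List.pairwise_cons.mp hpw).2
    have hne : ∀ q ∈ ps, p ≠ q := (List.pairwise_cons.mp hpw).1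
    cases hs : pvScan l p with
    | none =>
      simp only [List.foldl_cons, hs]
      rw [ih l hpw']
      simp [pvRemove, hs, pvScanFst]
    | some pr =>
      obtain ⟨x, r⟩ := pr
      have hx : pvKey x = some p := pvScan_key hs
      have hxq : ∀ q ∈ ps, pvKey x ≠ some q := by
        intro q hq hc
        exact hne q hq (by rw [hx] at hc; exact Option.some.inj hc)
      simp only [List.foldl_cons, hs]
      rw [ih (x :: r) hpw']
      have hfront : ps.reverse.filterMap (fun q => pvScanFst (x :: r) q)
          = ps.reverse.filterMap (fun q => pvScanFst l q) := by
        apply List.filterMap_congr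
        intro q hq
        have hq' : q ∈ ps := List.mem_reverse.mp hq
        have h1 : pvScanFst (x :: r) q = pvScanFst r q := by
          simp only [pvScanFst, pvScan, if_neg (hxq q hq')]
          cases pvScan r q with
          | none => simp
          | some w => obtain ⟨w1, w2⟩ := w; simp
        rw [h1, pvScanFst_remove hs (hxq q hq')]
      rw [hfront, foldl_pvRemove_cons hxq]
      have hr : pvRemove l p = r := by simp [pvRemove, hs]
      rw [hr]
      simp [List.reverse_cons, pvScanFst, hs]

-- the dict built by setdefault over the whole list answers: first player with that position
lemma dict_sel (l : List (List String × Int)) (q : String) :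
    ∀ d : PySem.Dict String (List String × Int),
      (l.foldl (fun d p =>
          match pvKey p with
          | some pos => d.setdefault pos p
          | none => d) d).get? q
      = match d.get? q with
        | some v => some v
        | none => pvScanFst l q := by
  induction l with
  | nil => intro d; simp [pvScanFst, pvScan]; cases d.get? q <;> simp
  | cons a t ih =>
    intro d
    simp only [List.foldl_cons]
    cases hk : pvKey a with
    | none =>
      rw [ih d]
      have : pvScanFst (a :: t) q = pvScanFst t q := by
        have : ¬ pvKey a = some q := by simp [hk]
        simp only [pvScanFst, pvScan, if_neg this]
        cases pvScan t q with
        | none => simp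
        | some w => obtain ⟨w1, w2⟩ := w; simp
      rw [this]
    | some pos =>
      rw [ih (d.setdefault pos a)]
      by_cases hpq : pos = q
      · subst hpq
        rw [PySem.Dict.get?_setdefault_self]
        cases hd : d.get? pos with
        | some v => simp
        | none =>
          simp only [Option.getD_none]
          have : pvScanFst (a :: t) pos = some a := by
            simp [pvScanFst, pvScan, hk]
          rw [this]
      · rw [PySem.Dict.get?_setdefault_of_ne d a (fun h => hpq h.symm)]
        cases hd : d.get? q with
        | some v => simp
        | none =>
          have : pvScanFst (a :: t) q = pvScanFst t q := by
            have hne : ¬ pvKey a = some q := by simp [hk, hpq]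
            simp only [pvScanFst, pvScan, if_neg hne]
            cases pvScan t q with
            | none => simp
            | some w => obtain ⟨w1, w2⟩ := w; simp
          rw [this]
  
-- list.remove of the first q-match removes exactly that occurrence
lemma remove_scan {m : List (List String × Int)} {q : String} {x : List String × Int}
    {r : List (List String × Int)} (h : pvScan m q = some (x, r)) :
    PySem.List.remove? m x = some r := by
  induction m generalizing x r with
  | nil => simp [pvScan] at h
  | cons a t ih =>
    by_cases ha : pvKey a = some q
    · simp [pvScan, ha] at h
      obtain ⟨hx, hr⟩ := h; subst hx; subst hr
      exact PySem.List.remove?_cons_self a t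
    · simp only [pvScan, if_neg ha] at h
      cases hs : pvScan t q with
      | none => rw [hs] at h; simp at h
      | some pr =>
        obtain ⟨y, ys⟩ := pr
        rw [hs] at h; simp at h
        obtain ⟨hx, hr⟩ := h; subst hx; subst hr
        have hax : a ≠ y := by
          intro hc
          exact ha (by rw [hc]; exact pvScan_key hs)
        rw [PySem.List.remove?_cons_of_ne t hax, ih hs]
        simp

-- B's removal loop equals the canonical removal fold, as long as g answers the first match
lemma B_tail (g : String → Option (List String × Int)) :
    ∀ (ps : List String) (m : List (List String × Int)), ps.Pairwise (· ≠ ·) →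
      (∀ q ∈ ps, g q = pvScanFst m q) →
      ps.foldl (fun t pos =>
          match g pos with
          | none => t
          | some x => (PySem.List.remove? t x).getD t) m
      = ps.foldl pvRemove m := by
  intro ps
  induction ps with
  | nil => intro m _ _; rfl
  | cons p ps ih =>
    intro m hpw hg
    have hpw' := (List.pairwise_cons.mp hpw).2
    have hne : ∀ q ∈ ps, p ≠ q := (List.pairwise_cons.mp hpw).1
    have hgp := hg p (by simp)
    cases hs : pvScan m p with
    | none =>
      have hgn : g p = none := by rw [hgp]; simp [pvScanFst, hs]
      have hrm : pvRemove m p = m := by simp [pvRemove, hs]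
      simp only [List.foldl_cons, hgn, hrm]
      exact ih m hpw' (fun q hq => hg q (by simp [hq]))
    | some pr =>
      obtain ⟨x, r⟩ := pr
      have hgx : g p = some x := by rw [hgp]; simp [pvScanFst, hs]
      have hrm : pvRemove m p = r := by simp [pvRemove, hs]
      have hrem : PySem.List.remove? m x = some r := remove_scan hs
      simp only [List.foldl_cons, hgx, hrm, hrem, Option.getD_some]
      apply ih r hpw'
      intro q hq
      have hxq : pvKey x ≠ some q := by
        intro hc
        exact hne q hq (by
          have := pvScan_key hs
          rw [this] at hc
          exact Option.some.inj hc)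
      rw [hg q (by simp [hq]), pvScanFst_remove hs hxq]

-- ===== VERDICT (by name: the statement is the Claim_ definition above) =====
theorem i_build_starting_five_spec : Claim_equal_i_build_starting_five := by
  intro team player_idcs _ _
  unfold Spec_i_build_starting_five
  unfold i_build_starting_five i_build_starting_five_alt
  set l := team.zip player_idcs with hl
  have hpw : (["C", "PF", "SF", "SG", "PG"] : List String).Pairwise (· ≠ ·) := by decide
  rw [A_shape _ l hpw]
  have hsel : ∀ q, (l.foldl (fun d p =>
      match pvKey p with
      | some pos => d.setdefault pos p
      | none => d) PySem.Dict.empty).get? q = pvScanFst l q := by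
    intro q
    rw [dict_sel l q PySem.Dict.empty]
    simp
  have hrev : (["C", "PF", "SF", "SG", "PG"] : List String).reverse
      = (["PG", "SG", "SF", "PF", "C"] : List String) := by decide
  rw [hrev]
  congr 1
  · exact (List.filterMap_congr (fun q _ => hsel q)).symm
  · rw [B_tail _ _ l hpw (fun q _ => (hsel q))]
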